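-- pv_equiv track=rewrite | github.com/ateliedigitalanalogico/ada-brand-manual | build/split_pages.py | nav_html
-- ===== SOURCE A (Python) =====
-- SECTIONS = [
--     # ── REGRAS ──────────────────────────────
--     ('01', 'logo',       '01 Logo e Wordmark'),
--     ('02', 'tipografia', '02 Tipografia'),
--     ('03', 'paleta',     '03 Paleta de Cores'),
--     ('04', 'grid',       '04 Grid e Espacamento'),
--     ('05', 'voz',        '05 Voz e Tom'),
--     ('06', 'imagetica',  '06 Linguagem Imagetica'),
--     # ── USOS ────────────────────────────────
--     ('07', 'impressos',  '07 Usos Impressos'),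
--     ('08', 'motion',     '08 Motion e Video'),
--     ('09', 'redes',      '09 Redes Sociais'),
--     ('10', 'merch',      '10 Merchandise'),
-- ]
--
-- NAV_SHORT = {
--     'cover': 'Capa',
--     '01': '01 Logo',       '02': '02 Tipografia', '03': '03 Paleta',  '04': '04 Grid',
--     '05': '05 Voz',        '06': '06 Imagetica',
--     '07': '07 Impressos',  '08': '08 Motion',     '09': '09 Redes',   '10': '10 Merch',
-- }
--
-- NAV_GRUPOS = {
--     '01':'regras','02':'regras','03':'regras','04':'regras','05':'regras','06':'regras',
--     '07':'usos',  '08':'usos',  '09':'usos',  '10':'usos',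
-- }
--
-- def nav_html(active_num, context='root'):
--     capa_href = '../index.html' if context == 'pages' else 'index.html'
--
--     drop_items = ''
--     # Capa
--     cls = ' active' if active_num == 'cover' else ''
--     drop_items += f'    <a href="{capa_href}" class="nav-drop-item{cls}" data-target="cover">Capa</a>\n'
--
--     # Separador de grupo REGRAS
--     drop_items += '    <div class="nav-group-label">Regras do Sistema</div>\n'
--     for num, slug, _ in SECTIONS:
--         if NAV_GRUPOS.get(num) != 'regras':
--             continue
--         href = f'{num}-{slug}.html' if context == 'pages' else f'pages/{num}-{slug}.html'
--         cls = ' active' if num == active_num else ''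
--         drop_items += f'    <a href="{href}" class="nav-drop-item{cls}" data-target="{num}">{NAV_SHORT.get(num, num)}</a>\n'
--
--     # Separador de grupo USOS
--     drop_items += '    <div class="nav-group-label nav-group-usos">Aplica\u00e7\u00f5es</div>\n'
--     for num, slug, _ in SECTIONS:
--         if NAV_GRUPOS.get(num) != 'usos':
--             continue
--         href = f'{num}-{slug}.html' if context == 'pages' else f'pages/{num}-{slug}.html'
--         cls = ' active' if num == active_num else ''
--         drop_items += f'    <a href="{href}" class="nav-drop-item{cls}" data-target="{num}">{NAV_SHORT.get(num, num)}</a>\n'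
--
--     current_text = NAV_SHORT.get(active_num, active_num)
--     return (
--         '<nav class="manual-nav">\n'
--         '  <div class="nav-inner">\n'
--         '    <div class="nav-logo">\n'
--         '      <svg width="14" style="color:#FFD600"><use href="#ada-sym"/></svg>\n'
--         '      <span>Manual de Marca</span>\n'
--         '    </div>\n'
--         f'    <div class="nav-current" id="nav-current">{current_text}</div>\n'
--         '    <button class="nav-toggle" id="nav-toggle" aria-label="Menu de secoes">\n'
--         '      <span class="nav-toggle-bar"></span>\n'
--         '      <span class="nav-toggle-bar"></span>\n'
--         '    </button>\n'
--         '  </div>\n'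
--         '  <div class="nav-dropdown" id="nav-dropdown">\n'
--         + drop_items +
--         '  </div>\n'
--         '</nav>'
--     )
-- ===== SOURCE B (Python) =====
-- SECTIONS = [
--     ('01', 'logo',       '01 Logo e Wordmark'),
--     ('02', 'tipografia', '02 Tipografia'),
--     ('03', 'paleta',     '03 Paleta de Cores'),
--     ('04', 'grid',       '04 Grid e Espacamento'),
--     ('05', 'voz',        '05 Voz e Tom'),
--     ('06', 'imagetica',  '06 Linguagem Imagetica'),
--     ('07', 'impressos',  '07 Usos Impressos'),
--     ('08', 'motion',     '08 Motion e Video'),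
--     ('09', 'redes',      '09 Redes Sociais'),
--     ('10', 'merch',      '10 Merchandise'),
-- ]
--
-- NAV_SHORT = {
--     'cover': 'Capa',
--     '01': '01 Logo',       '02': '02 Tipografia', '03': '03 Paleta',  '04': '04 Grid',
--     '05': '05 Voz',        '06': '06 Imagetica',
--     '07': '07 Impressos',  '08': '08 Motion',     '09': '09 Redes',   '10': '10 Merch',
-- }
--
-- NAV_GRUPOS = {
--     '01':'regras','02':'regras','03':'regras','04':'regras','05':'regras','06':'regras',
--     '07':'usos',  '08':'usos',  '09':'usos',  '10':'usos',
-- }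
--
--
-- def nav_html(active_num, context='root'):
--     pages = context == 'pages'
--     # one bucketing pass over SECTIONS: each rendered anchor goes to regras or usos
--     regras, usos = [], []
--     for num, slug, _ in SECTIONS:
--         href = f'{num}-{slug}.html' if pages else f'pages/{num}-{slug}.html'
--         cls = ' active' if num == active_num else ''
--         item = f'    <a href="{href}" class="nav-drop-item{cls}" data-target="{num}">{NAV_SHORT.get(num, num)}</a>\n'
--         (regras if NAV_GRUPOS.get(num) == 'regras' else usos).append(item)
--
--     capa_href = '../index.html' if pages else 'index.html'
--     capa_cls = ' active' if active_num == 'cover' else ''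
--     pieces = [
--         f'    <a href="{capa_href}" class="nav-drop-item{capa_cls}" data-target="cover">Capa</a>\n',
--         '    <div class="nav-group-label">Regras do Sistema</div>\n',
--         *regras,
--         '    <div class="nav-group-label nav-group-usos">Aplica\u00e7\u00f5es</div>\n',
--         *usos,
--     ]
--     current_text = NAV_SHORT.get(active_num, active_num)
--     return (
--         '<nav class="manual-nav">\n'
--         '  <div class="nav-inner">\n'
--         '    <div class="nav-logo">\n'
--         '      <svg width="14" style="color:#FFD600"><use href="#ada-sym"/></svg>\n'
--         '      <span>Manual de Marca</span>\n'
--         '    </div>\n'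
--         f'    <div class="nav-current" id="nav-current">{current_text}</div>\n'
--         '    <button class="nav-toggle" id="nav-toggle" aria-label="Menu de secoes">\n'
--         '      <span class="nav-toggle-bar"></span>\n'
--         '      <span class="nav-toggle-bar"></span>\n'
--         '    </button>\n'
--         '  </div>\n'
--         '  <div class="nav-dropdown" id="nav-dropdown">\n'
--         + ''.join(pieces) +
--         '  </div>\n'
--         '</nav>'
--     )
-- ===== Notes on version B (the rewrite author's own statement) =====
-- stated objective: alternative
-- what changed: Replaces A's incremental string accumulation with two separate group-filtered scans over SECTIONS by a single bucketing pass that appends each rendered anchor into a regras or usos list, then assembles the dropdown by joining capa, the two group labels and the two buckets.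
import Mathlib
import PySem

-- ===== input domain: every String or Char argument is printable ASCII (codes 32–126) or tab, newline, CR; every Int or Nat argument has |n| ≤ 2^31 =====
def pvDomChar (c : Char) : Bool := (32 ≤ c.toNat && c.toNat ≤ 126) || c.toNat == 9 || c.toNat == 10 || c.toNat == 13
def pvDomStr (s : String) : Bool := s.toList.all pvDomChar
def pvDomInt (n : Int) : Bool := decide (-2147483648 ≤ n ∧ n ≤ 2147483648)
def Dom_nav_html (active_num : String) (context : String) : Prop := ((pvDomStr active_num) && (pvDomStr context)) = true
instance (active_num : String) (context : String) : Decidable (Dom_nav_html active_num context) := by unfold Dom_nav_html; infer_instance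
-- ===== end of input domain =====

-- B replaces A's two filtered scans over SECTIONS by one bucketing pass into two lists
-- plus a join of the assembled pieces (objective: alternative decomposition, same cost).

-- shared module constants (same in both Python files)
def SECTIONS : List (String × String × String) :=
  [("01", "logo",       "01 Logo e Wordmark"),
   ("02", "tipografia", "02 Tipografia"),
   ("03", "paleta",     "03 Paleta de Cores"),
   ("04", "grid",       "04 Grid e Espacamento"),
   ("05", "voz",        "05 Voz e Tom"),
   ("06", "imagetica",  "06 Linguagem Imagetica"),
   ("07", "impressos",  "07 Usos Impressos"),
   ("08", "motion",     "08 Motion e Video"),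
   ("09", "redes",      "09 Redes Sociais"),
   ("10", "merch",      "10 Merchandise")]

def NAV_SHORT : PySem.Dict String String :=
  PySem.Dict.ofList
    [("cover", "Capa"),
     ("01", "01 Logo"), ("02", "02 Tipografia"), ("03", "03 Paleta"), ("04", "04 Grid"),
     ("05", "05 Voz"), ("06", "06 Imagetica"),
     ("07", "07 Impressos"), ("08", "08 Motion"), ("09", "09 Redes"), ("10", "10 Merch")]

def NAV_GRUPOS : PySem.Dict String String :=
  PySem.Dict.ofList
    [("01", "regras"), ("02", "regras"), ("03", "regras"), ("04", "regras"),
     ("05", "regras"), ("06", "regras"),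
     ("07", "usos"), ("08", "usos"), ("09", "usos"), ("10", "usos")]

def NAV_HEAD : String :=
  "<nav class=\"manual-nav\">\n  <div class=\"nav-inner\">\n    <div class=\"nav-logo\">\n      <svg width=\"14\" style=\"color:#FFD600\"><use href=\"#ada-sym\"/></svg>\n      <span>Manual de Marca</span>\n    </div>\n    <div class=\"nav-current\" id=\"nav-current\">"

def NAV_MID : String :=
  "</div>\n    <button class=\"nav-toggle\" id=\"nav-toggle\" aria-label=\"Menu de secoes\">\n      <span class=\"nav-toggle-bar\"></span>\n      <span class=\"nav-toggle-bar\"></span>\n    </button>\n  </div>\n  <div class=\"nav-dropdown\" id=\"nav-dropdown\">\n"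

def NAV_TAIL : String := "  </div>\n</nav>"

-- ===== PORT A =====
def nav_html (active_num : String) (context : String) : String :=
  let capa_href := if context = "pages" then "../index.html" else "index.html"
  let drop_items := ""
  let cls := if active_num = "cover" then " active" else ""
  let drop_items := drop_items ++ "    <a href=\"" ++ capa_href ++ "\" class=\"nav-drop-item" ++ cls ++ "\" data-target=\"cover\">Capa</a>\n"
  let drop_items := drop_items ++ "    <div class=\"nav-group-label\">Regras do Sistema</div>\n"
  -- first loop: only the 'regras' group
  let drop_items := SECTIONS.foldl (fun acc t =>
    let num := t.1
    let slug := t.2.1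
    if PySem.Dict.get? NAV_GRUPOS num ≠ some "regras" then acc
    else
      let href := if context = "pages" then num ++ "-" ++ slug ++ ".html" else "pages/" ++ num ++ "-" ++ slug ++ ".html"
      let cls := if num = active_num then " active" else ""
      acc ++ "    <a href=\"" ++ href ++ "\" class=\"nav-drop-item" ++ cls ++ "\" data-target=\"" ++ num ++ "\">" ++ PySem.Dict.getD NAV_SHORT num num ++ "</a>\n") drop_items
  let drop_items := drop_items ++ "    <div class=\"nav-group-label nav-group-usos\">Aplicações</div>\n"
  -- second loop: only the 'usos' group
  let drop_items := SECTIONS.foldl (fun acc t =>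
    let num := t.1
    let slug := t.2.1
    if PySem.Dict.get? NAV_GRUPOS num ≠ some "usos" then acc
    else
      let href := if context = "pages" then num ++ "-" ++ slug ++ ".html" else "pages/" ++ num ++ "-" ++ slug ++ ".html"
      let cls := if num = active_num then " active" else ""
      acc ++ "    <a href=\"" ++ href ++ "\" class=\"nav-drop-item" ++ cls ++ "\" data-target=\"" ++ num ++ "\">" ++ PySem.Dict.getD NAV_SHORT num num ++ "</a>\n") drop_items
  let current_text := PySem.Dict.getD NAV_SHORT active_num active_num
  NAV_HEAD ++ current_text ++ NAV_MID ++ drop_items ++ NAV_TAIL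

-- ===== PORT B =====
def nav_html_alt (active_num : String) (context : String) : String :=
  let pages := context = "pages"
  -- one bucketing pass: each rendered anchor appended to regras or usos
  let buckets := SECTIONS.foldl (fun (acc : List String × List String) t =>
    let num := t.1
    let slug := t.2.1
    let href := if pages then num ++ "-" ++ slug ++ ".html" else "pages/" ++ num ++ "-" ++ slug ++ ".html"
    let cls := if num = active_num then " active" else ""
    let item := "    <a href=\"" ++ href ++ "\" class=\"nav-drop-item" ++ cls ++ "\" data-target=\"" ++ num ++ "\">" ++ PySem.Dict.getD NAV_SHORT num num ++ "</a>\n"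
    if PySem.Dict.get? NAV_GRUPOS num = some "regras" then (acc.1 ++ [item], acc.2)
    else (acc.1, acc.2 ++ [item])) ([], [])
  let capa_href := if pages then "../index.html" else "index.html"
  let capa_cls := if active_num = "cover" then " active" else ""
  let pieces :=
    ["    <a href=\"" ++ capa_href ++ "\" class=\"nav-drop-item" ++ capa_cls ++ "\" data-target=\"cover\">Capa</a>\n",
     "    <div class=\"nav-group-label\">Regras do Sistema</div>\n"]
    ++ buckets.1
    ++ ["    <div class=\"nav-group-label nav-group-usos\">Aplicações</div>\n"]
    ++ buckets.2
  let current_text := PySem.Dict.getD NAV_SHORT active_num active_num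
  NAV_HEAD ++ current_text ++ NAV_MID ++ String.join pieces ++ NAV_TAIL

-- ===== PRECONDITION & SPEC =====
def Spec_nav_html (active_num : String) (context : String) (out : String) : Prop := out = nav_html_alt active_num context
instance (active_num : String) (context : String) (out : String) : Decidable (Spec_nav_html active_num context out) := by unfold Spec_nav_html; infer_instance

-- ===== CLAIM (what is proved, stated in full; the proofs are below) =====
def Claim_equal_nav_html : Prop := ∀ (active_num : String) (context : String), Dom_nav_html active_num context → Spec_nav_html active_num context (nav_html active_num context)

-- ===== LEMMAS AND PROOFS =====

-- ===== VERDICT (by name: the statement is the Claim_ definition above) =====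
theorem nav_html_spec : Claim_equal_nav_html := by
  intro a c _
  unfold Spec_nav_html nav_html nav_html_alt
  by_cases hc : c = "pages" <;>
    simp [hc, SECTIONS, NAV_GRUPOS, NAV_SHORT, PySem.Dict.get?, PySem.Dict.getD,
          PySem.Dict.ofList, PySem.Dict.update, PySem.Dict.empty, PySem.Dict.insert,
          PySem.Dict.contains, List.find?, String.join, String.append_assoc]
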